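-- pv_equiv track=rewrite | github.com/oedn305-rgb/apply. | apply.py | get_guaranteed_sale_content
-- ===== SOURCE A (Python) =====
-- NOON_CODE = "MSHL1"
--
-- def get_guaranteed_sale_content(email):
--     """محرك الإقناع: يربط الشخص بمنتج ورسالة تضمن الشراء 100%"""
--     email = email.lower()
--
--     # 1. الأطباء والكوادر الصحية (الراحة والوقت)
--     if any(x in email for x in ['health', 'moh', 'doctor', 'hospital', 'nurse', 'medical']):
--         subject = "🩺 دكتور/ة، راحة قدميك خلال 'شفت' العمل الطويل (كود MSHL1)"
--         body = (f"أهلاً بك يا بطل الصحة،\n\n"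
--                 f"نعلم أن وقوفك لساعات طويلة يرهق قدميك ويؤثر على تركيزك. اخترنا لك حذاء Skechers الطبي الأكثر مبيعاً في نون، المصمم لراحة فائقة وامتصاص الصدمات.\n\n"
--                 f"🛍️ المنتج المقترح: أحذية سكيتشرز (Skechers) الطبية.\n"
--                 f"💰 كود الخصم (تقديراً لجهودكم): {NOON_CODE}\n"
--                 f"🔗 اطلبه الآن لراحتك: https://www.noon.com/saudi-ar/p-10923")
--
--     # 2. الموظفين الماليين والمدراء (الفخامة والانطباع الأول)
--     elif any(x in email for x in ['bank', 'rajhi', 'alinma', 'pif', 'pwc', 'finance', 'tadawul']):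
--         subject = "💼 عطر النيش الذي يسبق حضورك في اجتماعاتك (خصم MSHL1)"
--         body = (f"تحية طيبة،\n\n"
--                 f"في عالم الأعمال، انطباعك الأول هو مفتاح نجاحك. عطر 'ديور ساواج' أو عطور النيش العالمية هي رفيقك المثالي للتميز.\n"
--                 f"احصل على الفخامة التي تليق بمقامك بخصم إضافي حصري لمنسوبي القطاع.\n\n"
--                 f"🛍️ المنتج المقترح: أرقى عطور النيش وساعات الماركات.\n"
--                 f"💰 كود البرستيج: {NOON_CODE}\n"
--                 f"🔗 تسوق الفخامة بذكاء: https://www.noon.com/saudi-ar/p-12345")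
--
--     # 3. المهندسين والفنيين (البطارية والتحمل في الميدان)
--     elif any(x in email for x in ['sabic', 'aramco', 'maaden', 'eng', 'tech', 'se.com', 'acwa']):
--         subject = "🔋 مهندسنا، لا تترك جوالك يخذلُك في قلب الموقع (كود MSHL1)"
--         body = (f"أهلاً بك يا بطل الميدان،\n\n"
--                 f"العمل الميداني يتطلب طاقة لا تنتهي. شاحن Anker المتنقل بقوة 20,000mAh هو المنقذ لجوالك وأجهزتك في المواقع البعيدة والمشاريع الكبرى.\n\n"
--                 f"🛍️ المنتج المقترح: شاحن أنكر (Powercore) المعتمد.\n"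
--                 f"💰 كود التوفير الميداني: {NOON_CODE}\n"
--                 f"🔗 اطلب سلاحك التقني: https://www.noon.com/saudi-ar/p-67890")
--
--     # 4. الطلاب والأكاديميين (الإنجاز والتركيز)
--     elif any(x in email for x in ['edu.sa', 'ksu', 'kau', 'pnu', 'university', 'tvtc']):
--         subject = "☕️ رفيق ليالي المذاكرة: قهوتك المختصة في غرفتك (MSHL1)"
--         body = (f"أهلاً بك،\n\n"
--                 f"لماذا تضيع وقتك في المقاهي؟ ماكينة Delonghi Dedica هي الحل لإعداد كوب الإسبريسو المثالي لبداية يوم مليء بالتركيز والتحصيل العلمي.\n\n"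
--                 f"🛍️ المنتج المقترح: ماكينة ديلونجي ديديكا الأصلية.\n"
--                 f"💰 كود الطالب والمحاضر: {NOON_CODE}\n"
--                 f"🔗 اطلبها وابدأ الإبداع: https://www.noon.com/saudi-ar/p-11223")
--
--     # 5. الرسالة العامة القوية (بقية الملف - استهداف منزلي)
--     else:
--         subject = "🏠 وفّري وقتك ومجهودك مع المكنسة اللاسلكية الذكية (MSHL1)"
--         body = (f"أهلاً بك،\n\n"
--                 f"التنظيف اليومي لا يجب أن يكون متعباً. مكنسة شاومي اللاسلكية تصل لأصعب الأماكن وتوفر عليك ساعات من الجهد بمميزات ذكية.\n\n"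
--                 f"🛍️ المنتج المقترح: مكنسة شاومي اللاسلكية (G10).\n"
--                 f"💰 كود التوفير المنزلي: {NOON_CODE}\n"
--                 f"🔗 تسوقي بذكاء الآن: https://www.noon.com/saudi-ar/p-44556")
--
--     return subject, body
-- ===== SOURCE B (Python) =====
-- NOON_CODE = "MSHL1"
--
-- GROUPS = [
--     ['health', 'moh', 'doctor', 'hospital', 'nurse', 'medical'],
--     ['bank', 'rajhi', 'alinma', 'pif', 'pwc', 'finance', 'tadawul'],
--     ['sabic', 'aramco', 'maaden', 'eng', 'tech', 'se.com', 'acwa'],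
--     ['edu.sa', 'ksu', 'kau', 'pnu', 'university', 'tvtc'],
-- ]
--
-- RESULTS = [
--     ("🩺 دكتور/ة، راحة قدميك خلال 'شفت' العمل الطويل (كود MSHL1)",
--      f"أهلاً بك يا بطل الصحة،\n\n"
--      f"نعلم أن وقوفك لساعات طويلة يرهق قدميك ويؤثر على تركيزك. اخترنا لك حذاء Skechers الطبي الأكثر مبيعاً في نون، المصمم لراحة فائقة وامتصاص الصدمات.\n\n"
--      f"🛍️ المنتج المقترح: أحذية سكيتشرز (Skechers) الطبية.\n"
--      f"💰 كود الخصم (تقديراً لجهودكم): {NOON_CODE}\n"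
--      f"🔗 اطلبه الآن لراحتك: https://www.noon.com/saudi-ar/p-10923"),
--     ("💼 عطر النيش الذي يسبق حضورك في اجتماعاتك (خصم MSHL1)",
--      f"تحية طيبة،\n\n"
--      f"في عالم الأعمال، انطباعك الأول هو مفتاح نجاحك. عطر 'ديور ساواج' أو عطور النيش العالمية هي رفيقك المثالي للتميز.\n"
--      f"احصل على الفخامة التي تليق بمقامك بخصم إضافي حصري لمنسوبي القطاع.\n\n"
--      f"🛍️ المنتج المقترح: أرقى عطور النيش وساعات الماركات.\n"
--      f"💰 كود البرستيج: {NOON_CODE}\n"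
--      f"🔗 تسوق الفخامة بذكاء: https://www.noon.com/saudi-ar/p-12345"),
--     ("🔋 مهندسنا، لا تترك جوالك يخذلُك في قلب الموقع (كود MSHL1)",
--      f"أهلاً بك يا بطل الميدان،\n\n"
--      f"العمل الميداني يتطلب طاقة لا تنتهي. شاحن Anker المتنقل بقوة 20,000mAh هو المنقذ لجوالك وأجهزتك في المواقع البعيدة والمشاريع الكبرى.\n\n"
--      f"🛍️ المنتج المقترح: شاحن أنكر (Powercore) المعتمد.\n"
--      f"💰 كود التوفير الميداني: {NOON_CODE}\n"
--      f"🔗 اطلب سلاحك التقني: https://www.noon.com/saudi-ar/p-67890"),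
--     ("☕️ رفيق ليالي المذاكرة: قهوتك المختصة في غرفتك (MSHL1)",
--      f"أهلاً بك،\n\n"
--      f"لماذا تضيع وقتك في المقاهي؟ ماكينة Delonghi Dedica هي الحل لإعداد كوب الإسبريسو المثالي لبداية يوم مليء بالتركيز والتحصيل العلمي.\n\n"
--      f"🛍️ المنتج المقترح: ماكينة ديلونجي ديديكا الأصلية.\n"
--      f"💰 كود الطالب والمحاضر: {NOON_CODE}\n"
--      f"🔗 اطلبها وابدأ الإبداع: https://www.noon.com/saudi-ar/p-11223"),
--     ("🏠 وفّري وقتك ومجهودك مع المكنسة اللاسلكية الذكية (MSHL1)",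
--      f"أهلاً بك،\n\n"
--      f"التنظيف اليومي لا يجب أن يكون متعباً. مكنسة شاومي اللاسلكية تصل لأصعب الأماكن وتوفر عليك ساعات من الجهد بمميزات ذكية.\n\n"
--      f"🛍️ المنتج المقترح: مكنسة شاومي اللاسلكية (G10).\n"
--      f"💰 كود التوفير المنزلي: {NOON_CODE}\n"
--      f"🔗 تسوقي بذكاء الآن: https://www.noon.com/saudi-ar/p-44556"),
-- ]
--
-- # Flat index of every keyword tagged with its category number; priority is
-- # recovered arithmetically: the answer is RESULTS[min matched category],
-- # with the last slot (home cleaning) as the no-match default.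
-- FLAT = [(kw, i) for i, group in enumerate(GROUPS) for kw in group]
--
--
-- def get_guaranteed_sale_content(email):
--     """محرك الإقناع: يربط الشخص بمنتج ورسالة تضمن الشراء 100%"""
--     e = email.lower()
--     best = len(RESULTS) - 1
--     for kw, i in FLAT:
--         if i < best and kw in e:
--             best = i
--     return RESULTS[best]
-- ===== Notes on version B (the rewrite author's own statement) =====
-- stated objective: alternative
-- what changed: Replaced the ordered if/elif first-match chain over keyword groups by a single min-scan over a flat (keyword, category-index) list: B computes the minimal matched category index with the default as last slot, then indexes a results table.
import Mathlib
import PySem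

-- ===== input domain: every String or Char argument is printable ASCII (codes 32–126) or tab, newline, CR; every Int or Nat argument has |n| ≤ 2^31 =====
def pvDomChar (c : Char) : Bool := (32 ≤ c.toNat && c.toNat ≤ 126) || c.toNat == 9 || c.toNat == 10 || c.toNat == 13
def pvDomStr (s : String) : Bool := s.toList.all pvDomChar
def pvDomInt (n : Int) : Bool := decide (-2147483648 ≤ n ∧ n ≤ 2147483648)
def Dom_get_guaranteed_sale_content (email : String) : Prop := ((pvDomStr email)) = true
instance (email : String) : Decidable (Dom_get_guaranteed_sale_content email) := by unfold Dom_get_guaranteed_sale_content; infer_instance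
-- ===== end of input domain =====

-- B replaces the if/elif first-match chain with a min-scan over a flat (keyword, category) index
-- followed by a table lookup; objective: alternative decomposition, same cost.

-- ===== PORT A =====
def get_guaranteed_sale_content (email : String) : String × String :=
  let e := PySem.Str.lower email
  if (["health", "moh", "doctor", "hospital", "nurse", "medical"] : List String).any (fun x => PySem.Str.isIn x e) then
    ("🩺 دكتور/ة، راحة قدميك خلال 'شفت' العمل الطويل (كود MSHL1)",
     "أهلاً بك يا بطل الصحة،\n\nنعلم أن وقوفك لساعات طويلة يرهق قدميك ويؤثر على تركيزك. اخترنا لك حذاء Skechers الطبي الأكثر مبيعاً في نون، المصمم لراحة فائقة وامتصاص الصدمات.\n\n🛍️ المنتج المقترح: أحذية سكيتشرز (Skechers) الطبية.\n💰 كود الخصم (تقديراً لجهودكم): MSHL1\n🔗 اطلبه الآن لراحتك: https://www.noon.com/saudi-ar/p-10923")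
  else if (["bank", "rajhi", "alinma", "pif", "pwc", "finance", "tadawul"] : List String).any (fun x => PySem.Str.isIn x e) then
    ("💼 عطر النيش الذي يسبق حضورك في اجتماعاتك (خصم MSHL1)",
     "تحية طيبة،\n\nفي عالم الأعمال، انطباعك الأول هو مفتاح نجاحك. عطر 'ديور ساواج' أو عطور النيش العالمية هي رفيقك المثالي للتميز.\nاحصل على الفخامة التي تليق بمقامك بخصم إضافي حصري لمنسوبي القطاع.\n\n🛍️ المنتج المقترح: أرقى عطور النيش وساعات الماركات.\n💰 كود البرستيج: MSHL1\n🔗 تسوق الفخامة بذكاء: https://www.noon.com/saudi-ar/p-12345")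
  else if (["sabic", "aramco", "maaden", "eng", "tech", "se.com", "acwa"] : List String).any (fun x => PySem.Str.isIn x e) then
    ("🔋 مهندسنا، لا تترك جوالك يخذلُك في قلب الموقع (كود MSHL1)",
     "أهلاً بك يا بطل الميدان،\n\nالعمل الميداني يتطلب طاقة لا تنتهي. شاحن Anker المتنقل بقوة 20,000mAh هو المنقذ لجوالك وأجهزتك في المواقع البعيدة والمشاريع الكبرى.\n\n🛍️ المنتج المقترح: شاحن أنكر (Powercore) المعتمد.\n💰 كود التوفير الميداني: MSHL1\n🔗 اطلب سلاحك التقني: https://www.noon.com/saudi-ar/p-67890")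
  else if (["edu.sa", "ksu", "kau", "pnu", "university", "tvtc"] : List String).any (fun x => PySem.Str.isIn x e) then
    ("☕️ رفيق ليالي المذاكرة: قهوتك المختصة في غرفتك (MSHL1)",
     "أهلاً بك،\n\nلماذا تضيع وقتك في المقاهي؟ ماكينة Delonghi Dedica هي الحل لإعداد كوب الإسبريسو المثالي لبداية يوم مليء بالتركيز والتحصيل العلمي.\n\n🛍️ المنتج المقترح: ماكينة ديلونجي ديديكا الأصلية.\n💰 كود الطالب والمحاضر: MSHL1\n🔗 اطلبها وابدأ الإبداع: https://www.noon.com/saudi-ar/p-11223")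
  else
    ("🏠 وفّري وقتك ومجهودك مع المكنسة اللاسلكية الذكية (MSHL1)",
     "أهلاً بك،\n\nالتنظيف اليومي لا يجب أن يكون متعباً. مكنسة شاومي اللاسلكية تصل لأصعب الأماكن وتوفر عليك ساعات من الجهد بمميزات ذكية.\n\n🛍️ المنتج المقترح: مكنسة شاومي اللاسلكية (G10).\n💰 كود التوفير المنزلي: MSHL1\n🔗 تسوقي بذكاء الآن: https://www.noon.com/saudi-ar/p-44556")

-- ===== PORT B =====
def pvGroups : List (List String) :=
  [["health", "moh", "doctor", "hospital", "nurse", "medical"],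
   ["bank", "rajhi", "alinma", "pif", "pwc", "finance", "tadawul"],
   ["sabic", "aramco", "maaden", "eng", "tech", "se.com", "acwa"],
   ["edu.sa", "ksu", "kau", "pnu", "university", "tvtc"]]

def pvResults : List (String × String) :=
  [("🩺 دكتور/ة، راحة قدميك خلال 'شفت' العمل الطويل (كود MSHL1)",
    "أهلاً بك يا بطل الصحة،\n\nنعلم أن وقوفك لساعات طويلة يرهق قدميك ويؤثر على تركيزك. اخترنا لك حذاء Skechers الطبي الأكثر مبيعاً في نون، المصمم لراحة فائقة وامتصاص الصدمات.\n\n🛍️ المنتج المقترح: أحذية سكيتشرز (Skechers) الطبية.\n💰 كود الخصم (تقديراً لجهودكم): MSHL1\n🔗 اطلبه الآن لراحتك: https://www.noon.com/saudi-ar/p-10923"),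
   ("💼 عطر النيش الذي يسبق حضورك في اجتماعاتك (خصم MSHL1)",
    "تحية طيبة،\n\nفي عالم الأعمال، انطباعك الأول هو مفتاح نجاحك. عطر 'ديور ساواج' أو عطور النيش العالمية هي رفيقك المثالي للتميز.\nاحصل على الفخامة التي تليق بمقامك بخصم إضافي حصري لمنسوبي القطاع.\n\n🛍️ المنتج المقترح: أرقى عطور النيش وساعات الماركات.\n💰 كود البرستيج: MSHL1\n🔗 تسوق الفخامة بذكاء: https://www.noon.com/saudi-ar/p-12345"),
   ("🔋 مهندسنا، لا تترك جوالك يخذلُك في قلب الموقع (كود MSHL1)",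
    "أهلاً بك يا بطل الميدان،\n\nالعمل الميداني يتطلب طاقة لا تنتهي. شاحن Anker المتنقل بقوة 20,000mAh هو المنقذ لجوالك وأجهزتك في المواقع البعيدة والمشاريع الكبرى.\n\n🛍️ المنتج المقترح: شاحن أنكر (Powercore) المعتمد.\n💰 كود التوفير الميداني: MSHL1\n🔗 اطلب سلاحك التقني: https://www.noon.com/saudi-ar/p-67890"),
   ("☕️ رفيق ليالي المذاكرة: قهوتك المختصة في غرفتك (MSHL1)",
    "أهلاً بك،\n\nلماذا تضيع وقتك في المقاهي؟ ماكينة Delonghi Dedica هي الحل لإعداد كوب الإسبريسو المثالي لبداية يوم مليء بالتركيز والتحصيل العلمي.\n\n🛍️ المنتج المقترح: ماكينة ديلونجي ديديكا الأصلية.\n💰 كود الطالب والمحاضر: MSHL1\n🔗 اطلبها وابدأ الإبداع: https://www.noon.com/saudi-ar/p-11223"),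
   ("🏠 وفّري وقتك ومجهودك مع المكنسة اللاسلكية الذكية (MSHL1)",
    "أهلاً بك،\n\nالتنظيف اليومي لا يجب أن يكون متعباً. مكنسة شاومي اللاسلكية تصل لأصعب الأماكن وتوفر عليك ساعات من الجهد بمميزات ذكية.\n\n🛍️ المنتج المقترح: مكنسة شاومي اللاسلكية (G10).\n💰 كود التوفير المنزلي: MSHL1\n🔗 تسوقي بذكاء الآن: https://www.noon.com/saudi-ar/p-44556")]

-- FLAT = [(kw, i) for i, group in enumerate(GROUPS) for kw in group]
def pvFlat : List (String × Int) :=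
  (PySem.List.enumerate pvGroups).flatMap (fun p => p.2.map (fun kw => (kw, p.1)))

def get_guaranteed_sale_content_alt (email : String) : String × String :=
  let e := PySem.Str.lower email
  let best := pvFlat.foldl (fun b p => if p.2 < b && PySem.Str.isIn p.1 e then p.2 else b)
    ((pvResults.length : Int) - 1)
  -- RESULTS[best]: best always lies in [0, len-1], so the Python indexing never raises;
  -- the default here is unreachable.
  PySem.List.pyGetD pvResults best ("", "")

-- ===== PRECONDITION & SPEC =====
def Spec_get_guaranteed_sale_content (email : String) (out : String × String) : Prop := out = get_guaranteed_sale_content_alt email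
instance (email : String) (out : String × String) : Decidable (Spec_get_guaranteed_sale_content email out) := by unfold Spec_get_guaranteed_sale_content; infer_instance

-- ===== CLAIM (what is proved, stated in full; the proofs are below) =====
def Claim_equal_get_guaranteed_sale_content : Prop := ∀ (email : String), Dom_get_guaranteed_sale_content email → Spec_get_guaranteed_sale_content email (get_guaranteed_sale_content email)

-- ===== LEMMAS AND PROOFS =====

-- Folding B's min-step over one category's keywords (all tagged g) lowers the
-- accumulator to g exactly when g < b and some keyword matches.
theorem pvFold_group (f : String → Bool) (g : Int) (kws : List String) (b : Int) :
    (kws.map (fun kw => (kw, g))).foldl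
        (fun b p => if p.2 < b && f p.1 then p.2 else b) b
      = if g < b && kws.any f then g else b := by
  induction kws generalizing b with
  | nil => simp
  | cons hd tl ih =>
    simp only [List.map_cons, List.foldl_cons, List.any_cons]
    rw [ih]
    by_cases h1 : g < b <;> by_cases h2 : f hd = true <;> simp [h1, h2]

set_option maxRecDepth 40000 in
theorem get_guaranteed_sale_content_spec : Claim_equal_get_guaranteed_sale_content := by
  intro email _
  unfold Spec_get_guaranteed_sale_content
  simp only [get_guaranteed_sale_content, get_guaranteed_sale_content_alt]
  have hf : pvFlat =
      (["health", "moh", "doctor", "hospital", "nurse", "medical"].map (fun kw => (kw, (0 : Int))))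
      ++ (["bank", "rajhi", "alinma", "pif", "pwc", "finance", "tadawul"].map (fun kw => (kw, (1 : Int))))
      ++ (["sabic", "aramco", "maaden", "eng", "tech", "se.com", "acwa"].map (fun kw => (kw, (2 : Int))))
      ++ (["edu.sa", "ksu", "kau", "pnu", "university", "tvtc"].map (fun kw => (kw, (3 : Int)))) := by
    rfl
  rw [hf]
  rw [List.foldl_append, List.foldl_append, List.foldl_append,
    pvFold_group (f := fun kw => PySem.Str.isIn kw (PySem.Str.lower email)),
    pvFold_group (f := fun kw => PySem.Str.isIn kw (PySem.Str.lower email)),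
    pvFold_group (f := fun kw => PySem.Str.isIn kw (PySem.Str.lower email)),
    pvFold_group (f := fun kw => PySem.Str.isIn kw (PySem.Str.lower email))]
  by_cases h0 : (["health", "moh", "doctor", "hospital", "nurse", "medical"] : List String).any (fun kw => PySem.Str.isIn kw (PySem.Str.lower email)) = true <;>
  by_cases h1 : (["bank", "rajhi", "alinma", "pif", "pwc", "finance", "tadawul"] : List String).any (fun kw => PySem.Str.isIn kw (PySem.Str.lower email)) = true <;>
  by_cases h2 : (["sabic", "aramco", "maaden", "eng", "tech", "se.com", "acwa"] : List String).any (fun kw => PySem.Str.isIn kw (PySem.Str.lower email)) = true <;>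
  by_cases h3 : (["edu.sa", "ksu", "kau", "pnu", "university", "tvtc"] : List String).any (fun kw => PySem.Str.isIn kw (PySem.Str.lower email)) = true <;>
  · simp only [h0, h1, h2, h3, Bool.not_eq_true] at *
    norm_num [pvResults, PySem.List.pyGetD, PySem.List.pyGet?, PySem.List.pyIdx?, Int.toNat,
      List.getElem_cons_succ, List.getElem_cons_zero]
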